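-- pv_equiv track=rewrite | github.com/SeifBoukerdenna/CRCoach | server/utils/validators.py | validate_message
-- ===== SOURCE A (Python) =====
-- from typing import Dict, Any, Optional
--
-- def validate_message(message: Dict[str, Any]) -> bool:
--     """Validate message format"""
--     if not isinstance(message, dict):
--         return False
--
--     # Must have type field
--     if 'type' not in message:
--         return False
--
--     message_type = message['type']
--
--     # Validate based on message type
--     if message_type == 'connect':
--         return all(key in message for key in ['sessionCode', 'role'])
--
--     elif message_type in ['offer', 'answer']:
--         return 'sdp' in message
--
--     elif message_type == 'ice':
--         return all(key in message for key in ['candidate', 'sdpMLineIndex', 'sdpMid'])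
--
--     elif message_type == 'ping':
--         return True
--
--     return False
-- ===== SOURCE B (Python) =====
-- _KEYBIT = {
--     'sessionCode': 1,
--     'role': 2,
--     'sdp': 4,
--     'candidate': 8,
--     'sdpMLineIndex': 16,
--     'sdpMid': 32,
--     'type': 64,
-- }
--
-- _NEEDMASK = {
--     'connect': 1 | 2 | 64,
--     'offer': 4 | 64,
--     'answer': 4 | 64,
--     'ice': 8 | 16 | 32 | 64,
--     'ping': 64,
-- }
--
-- def validate_message(message):
--     """Single pass over the dict: OR the bit of every recognized key into a
--     mask, then compare the mask against the required-bits mask of the type."""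
--     if not isinstance(message, dict):
--         return False
--     have = 0
--     for key in message:
--         have |= _KEYBIT.get(key, 0)
--     need = _NEEDMASK.get(message.get('type'))
--     return need is not None and have & need == need
-- ===== Notes on version B (the rewrite author's own statement) =====
-- stated objective: alternative
-- what changed: Instead of A's per-type membership checks (one scan per required key), B makes one pass over the dict ORing a bit per recognized key into a mask and compares that mask against the type's required-bits mask.
import Mathlib
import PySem

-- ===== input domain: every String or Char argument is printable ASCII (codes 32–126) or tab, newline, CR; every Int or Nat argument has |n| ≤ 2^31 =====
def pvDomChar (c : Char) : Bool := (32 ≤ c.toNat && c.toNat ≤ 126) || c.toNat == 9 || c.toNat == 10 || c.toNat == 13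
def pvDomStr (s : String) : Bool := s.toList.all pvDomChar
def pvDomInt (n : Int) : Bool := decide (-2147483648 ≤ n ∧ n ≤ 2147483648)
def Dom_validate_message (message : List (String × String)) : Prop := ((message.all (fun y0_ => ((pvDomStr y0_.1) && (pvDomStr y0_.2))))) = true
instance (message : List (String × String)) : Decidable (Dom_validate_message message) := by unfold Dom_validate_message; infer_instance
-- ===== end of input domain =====

-- B replaces A's per-type membership scans by ONE pass over the dict that ORs a bit
-- per recognized key into a mask, compared against the type's required-bits mask; objective: alternative.

-- ===== PORT A =====
-- dict membership / lookup on the association list: first match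
def pvLookup (message : List (String × String)) (k : String) : Option String :=
  (message.find? (fun p => p.1 == k)).map (·.2)

def pvHasKey (message : List (String × String)) (k : String) : Bool :=
  (pvLookup message k).isSome

def validate_message (message : List (String × String)) : Bool :=
  if !pvHasKey message "type" then false
  else
    match pvLookup message "type" with
    | none => false
    | some message_type =>
      if message_type == "connect" then
        (["sessionCode", "role"].all (fun key => pvHasKey message key))
      else if ["offer", "answer"].contains message_type then
        pvHasKey message "sdp"
      else if message_type == "ice" then
        (["candidate", "sdpMLineIndex", "sdpMid"].all (fun key => pvHasKey message key))
      else if message_type == "ping" then true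
      else false

-- ===== PORT B =====
def pvKeyBit : PySem.Dict String Nat :=
  PySem.Dict.mk [("sessionCode", 1), ("role", 2), ("sdp", 4),
                 ("candidate", 8), ("sdpMLineIndex", 16), ("sdpMid", 32), ("type", 64)]

def pvNeedMask : PySem.Dict String Nat :=
  PySem.Dict.mk [("connect", 67), ("offer", 68), ("answer", 68), ("ice", 120), ("ping", 64)]

def validate_message_alt (message : List (String × String)) : Bool :=
  let haveMask := message.foldl (fun acc p => acc ||| PySem.Dict.getD pvKeyBit p.1 0) 0
  -- need = _NEEDMASK.get(message.get('type')); None lookup never matches a string key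
  match (message.find? (fun p => p.1 == "type")).map (·.2) with
  | none => false
  | some t =>
    match PySem.Dict.get? pvNeedMask t with
    | none => false
    | some need => haveMask &&& need == need

-- ===== PRECONDITION & SPEC =====
def Spec_validate_message (message : List (String × String)) (out : Bool) : Prop := out = validate_message_alt message
instance (message : List (String × String)) (out : Bool) : Decidable (Spec_validate_message message out) := by unfold Spec_validate_message; infer_instance

-- ===== CLAIM (what is proved, stated in full; the proofs are below) =====
def Claim_equal_validate_message : Prop := ∀ (message : List (String × String)), Dom_validate_message message → Spec_validate_message message (validate_message message)

-- ===== LEMMAS AND PROOFS =====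

-- bit i of the accumulated mask = some key of the message carries bit i
theorem pv_mask_testBit (message : List (String × String)) (acc : Nat) (i : Nat) :
    (message.foldl (fun acc p => acc ||| PySem.Dict.getD pvKeyBit p.1 0) acc).testBit i
      = (acc.testBit i || message.any (fun p => (PySem.Dict.getD pvKeyBit p.1 0).testBit i)) := by
  induction message generalizing acc with
  | nil => simp
  | cons p rest ih =>
    simp [List.foldl_cons, ih, Nat.testBit_or, Bool.or_assoc]

theorem pv_and_eq_self (a c : Nat) :
    (a &&& c = c) ↔ (∀ i, c.testBit i = true → a.testBit i = true) := by
  constructor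
  · intro h i hi
    have h2 := congrArg (fun n => n.testBit i) h
    simp only [Nat.testBit_and, hi, Bool.and_true] at h2
    exact h2
  · intro h
    apply Nat.eq_of_testBit_eq
    intro i
    by_cases hi : c.testBit i = true
    · simp [Nat.testBit_and, hi, h i hi]
    · simp [Nat.testBit_and, Bool.eq_false_iff.mpr hi]

theorem pv_bit_lt (c i : Nat) (hc : c < 128) (h : c.testBit i = true) : i < 7 := by
  by_contra h7
  push_neg at h7
  have hlt : c < 2 ^ i :=
    lt_of_lt_of_le hc (le_trans (by norm_num) (Nat.pow_le_pow_right (by norm_num) h7))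
  rw [Nat.testBit_lt_two_pow hlt] at h
  exact Bool.false_ne_true h

-- which bit a recognized key carries
theorem pv_keybit_eq (k : String) :
    PySem.Dict.getD pvKeyBit k 0 =
      (if k == "sessionCode" then 1 else if k == "role" then 2 else if k == "sdp" then 4
       else if k == "candidate" then 8 else if k == "sdpMLineIndex" then 16
       else if k == "sdpMid" then 32 else if k == "type" then 64 else 0) := by
  by_cases h1 : k = "sessionCode"
  · subst h1; decide
  by_cases h2 : k = "role"
  · subst h2; decide
  by_cases h3 : k = "sdp"
  · subst h3; decide
  by_cases h4 : k = "candidate"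
  · subst h4; decide
  by_cases h5 : k = "sdpMLineIndex"
  · subst h5; decide
  by_cases h6 : k = "sdpMid"
  · subst h6; decide
  by_cases h7 : k = "type"
  · subst h7; decide
  simp [pvKeyBit, PySem.Dict.getD, PySem.Dict.get?_mk_cons,
    beq_eq_false_iff_ne.mpr (Ne.symm h1), beq_eq_false_iff_ne.mpr (Ne.symm h2),
    beq_eq_false_iff_ne.mpr (Ne.symm h3), beq_eq_false_iff_ne.mpr (Ne.symm h4),
    beq_eq_false_iff_ne.mpr (Ne.symm h5), beq_eq_false_iff_ne.mpr (Ne.symm h6),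
    beq_eq_false_iff_ne.mpr (Ne.symm h7),
    beq_eq_false_iff_ne.mpr h1, beq_eq_false_iff_ne.mpr h2, beq_eq_false_iff_ne.mpr h3,
    beq_eq_false_iff_ne.mpr h4, beq_eq_false_iff_ne.mpr h5, beq_eq_false_iff_ne.mpr h6,
    beq_eq_false_iff_ne.mpr h7, PySem.Dict.get?]

theorem pv_kb0 (k : String) : (PySem.Dict.getD pvKeyBit k 0).testBit 0 = (k == "sessionCode") := by
  rw [pv_keybit_eq]; split_ifs <;> simp_all <;> decide
theorem pv_kb1 (k : String) : (PySem.Dict.getD pvKeyBit k 0).testBit 1 = (k == "role") := by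
  rw [pv_keybit_eq]; split_ifs <;> simp_all <;> decide
theorem pv_kb2 (k : String) : (PySem.Dict.getD pvKeyBit k 0).testBit 2 = (k == "sdp") := by
  rw [pv_keybit_eq]; split_ifs <;> simp_all <;> decide
theorem pv_kb3 (k : String) : (PySem.Dict.getD pvKeyBit k 0).testBit 3 = (k == "candidate") := by
  rw [pv_keybit_eq]; split_ifs <;> simp_all <;> decide
theorem pv_kb4 (k : String) : (PySem.Dict.getD pvKeyBit k 0).testBit 4 = (k == "sdpMLineIndex") := by
  rw [pv_keybit_eq]; split_ifs <;> simp_all <;> decide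
theorem pv_kb5 (k : String) : (PySem.Dict.getD pvKeyBit k 0).testBit 5 = (k == "sdpMid") := by
  rw [pv_keybit_eq]; split_ifs <;> simp_all <;> decide
theorem pv_kb6 (k : String) : (PySem.Dict.getD pvKeyBit k 0).testBit 6 = (k == "type") := by
  rw [pv_keybit_eq]; split_ifs <;> simp_all <;> decide

-- (a &&& c == c) as the conjunction of c's bits, for each needed mask
theorem pv_and67 (a : Nat) : (a &&& 67 == 67) = (a.testBit 0 && a.testBit 1 && a.testBit 6) := by
  rw [Bool.eq_iff_iff]
  simp only [beq_iff_eq, Bool.and_eq_true]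
  rw [pv_and_eq_self]
  constructor
  · intro h; exact ⟨⟨h 0 (by decide), h 1 (by decide)⟩, h 6 (by decide)⟩
  · rintro ⟨⟨g0, g1⟩, g6⟩ i hi
    have := pv_bit_lt 67 i (by norm_num) hi
    interval_cases i <;> first | assumption | exact absurd hi (by decide)

theorem pv_and68 (a : Nat) : (a &&& 68 == 68) = (a.testBit 2 && a.testBit 6) := by
  rw [Bool.eq_iff_iff]
  simp only [beq_iff_eq, Bool.and_eq_true]
  rw [pv_and_eq_self]
  constructor
  · intro h; exact ⟨h 2 (by decide), h 6 (by decide)⟩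
  · rintro ⟨g2, g6⟩ i hi
    have := pv_bit_lt 68 i (by norm_num) hi
    interval_cases i <;> first | assumption | exact absurd hi (by decide)

theorem pv_and120 (a : Nat) : (a &&& 120 == 120) = (a.testBit 3 && a.testBit 4 && a.testBit 5 && a.testBit 6) := by
  rw [Bool.eq_iff_iff]
  simp only [beq_iff_eq, Bool.and_eq_true]
  rw [pv_and_eq_self]
  constructor
  · intro h; exact ⟨⟨⟨h 3 (by decide), h 4 (by decide)⟩, h 5 (by decide)⟩, h 6 (by decide)⟩
  · rintro ⟨⟨⟨g3, g4⟩, g5⟩, g6⟩ i hi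
    have := pv_bit_lt 120 i (by norm_num) hi
    interval_cases i <;> first | assumption | exact absurd hi (by decide)

theorem pv_and64 (a : Nat) : (a &&& 64 == 64) = a.testBit 6 := by
  rw [Bool.eq_iff_iff]
  simp only [beq_iff_eq]
  rw [pv_and_eq_self]
  constructor
  · intro h; exact h 6 (by decide)
  · intro g6 i hi
    have := pv_bit_lt 64 i (by norm_num) hi
    interval_cases i <;> first | assumption | exact absurd hi (by decide)

-- value of the needed-mask lookup at each known type
theorem pv_need_connect : PySem.Dict.get? pvNeedMask "connect" = some 67 := by rfl
theorem pv_need_offer : PySem.Dict.get? pvNeedMask "offer" = some 68 := by rfl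
theorem pv_need_answer : PySem.Dict.get? pvNeedMask "answer" = some 68 := by rfl
theorem pv_need_ice : PySem.Dict.get? pvNeedMask "ice" = some 120 := by rfl
theorem pv_need_ping : PySem.Dict.get? pvNeedMask "ping" = some 64 := by rfl

-- ===== VERDICT (by name: the statement is the Claim_ definition above) =====
theorem validate_message_spec : Claim_equal_validate_message := by
  intro message _
  unfold Spec_validate_message validate_message validate_message_alt pvHasKey pvLookup
  cases h : (message.find? (fun p => p.1 == "type")).map (·.2) with
  | none => simp [h]
  | some t =>
    have ht : message.any (fun p => p.1 == "type") = true := by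
      rw [← List.isSome_find?]
      cases hf : message.find? (fun p => p.1 == "type") <;> rw [hf] at h <;> simp_all
    simp only [h, Option.isSome_some, Bool.not_true, Bool.false_eq_true, if_false]
    by_cases h1 : t = "connect"
    · subst h1
      simp only [pv_need_connect, pv_and67, pv_mask_testBit, Nat.zero_testBit, Bool.false_or,
        pv_kb0, pv_kb1, pv_kb6]
      simp [ht, List.isSome_find?]
    by_cases h2 : t = "offer"
    · subst h2
      simp only [pv_need_offer, pv_and68, pv_mask_testBit, Nat.zero_testBit, Bool.false_or,
        pv_kb2, pv_kb6]
      simp [ht, List.isSome_find?]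
    by_cases h3 : t = "answer"
    · subst h3
      simp only [pv_need_answer, pv_and68, pv_mask_testBit, Nat.zero_testBit, Bool.false_or,
        pv_kb2, pv_kb6]
      simp [ht, List.isSome_find?]
    by_cases h4 : t = "ice"
    · subst h4
      simp only [pv_need_ice, pv_and120, pv_mask_testBit, Nat.zero_testBit, Bool.false_or,
        pv_kb3, pv_kb4, pv_kb5, pv_kb6]
      simp [ht, List.isSome_find?, Bool.and_assoc]
    by_cases h5 : t = "ping"
    · subst h5
      simp only [pv_need_ping, pv_and64, pv_mask_testBit, Nat.zero_testBit, Bool.false_or,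
        pv_kb6]
      simp [ht]
    · have e : PySem.Dict.get? pvNeedMask t = none := by
        simp [pvNeedMask, PySem.Dict.get?_mk_cons, PySem.Dict.get?,
          beq_eq_false_iff_ne.mpr (Ne.symm h1), beq_eq_false_iff_ne.mpr (Ne.symm h2),
          beq_eq_false_iff_ne.mpr (Ne.symm h3), beq_eq_false_iff_ne.mpr (Ne.symm h4),
          beq_eq_false_iff_ne.mpr (Ne.symm h5)]
      simp [e, beq_eq_false_iff_ne.mpr h1, beq_eq_false_iff_ne.mpr h4, beq_eq_false_iff_ne.mpr h5]
      rintro (rfl | rfl)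
      · exact (h2 rfl).elim
      · exact (h3 rfl).elim
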